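-- pv_equiv track=rewrite | github.com/Vaidik6920/SMRM | utils/interpretation_logic.py | condense_from_tiers
-- ===== SOURCE A (Python) =====
-- from typing import Dict, List
--
-- def condense_from_tiers(vt, et, vrt, ert, positive=True) -> List[str]:
--     """Condense metrics to brief summary labels."""
--     strong_tiers = {"Gold", "Silver"}
--     weak_tiers = {"Bronze", "Needs Effort"}
--     tiers = [vt, et, vrt, ert]
--
--     REACH_LABEL = "Reach"
--     ENGAGE_LABEL = "Engagement"
--     VIEW_EFF_LABEL = "View Efficiency"
--     ENG_EFF_LABEL = "Engagement Efficiency"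
--
--     if positive:
--         # FIXED: Only Gold and Silver are positive (NOT Bronze)
--         if not any(t in strong_tiers for t in tiers):
--             return []
--         all_strong = all(t in strong_tiers for t in tiers)
--         flags = [vt in strong_tiers, et in strong_tiers, vrt in strong_tiers, ert in strong_tiers]
--         if all_strong:
--             return ["Overall Performance"]
--     else:
--         if not any(t in weak_tiers for t in tiers):
--             return []
--         all_weak = all(t in weak_tiers for t in tiers)
--         flags = [vt in weak_tiers, et in weak_tiers, vrt in weak_tiers, ert in weak_tiers]
--         if all_weak:
--             return ["Overall Performance"]
--
--     reach_flags = flags[:2]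
--     eff_flags = flags[2:]
--
--     result_parts = []
--     # Reach
--     if all(reach_flags):
--         result_parts.append("Overall Reach")
--     else:
--         if reach_flags[0]:
--             result_parts.append(REACH_LABEL)
--         if reach_flags[1]:
--             result_parts.append(ENGAGE_LABEL)
--
--     # Efficiency
--     if all(eff_flags):
--         result_parts.append("Overall Efficiency")
--     else:
--         if eff_flags[0]:
--             result_parts.append(VIEW_EFF_LABEL)
--         if eff_flags[1]:
--             result_parts.append(ENG_EFF_LABEL)
--
--     return result_parts
-- ===== SOURCE B (Python) =====
-- # All 16 possible outputs, indexed by the 4-bit membership mask (vt,et,vrt,ert).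
-- _TABLE = (
--     (), ("Engagement Efficiency",), ("View Efficiency",), ("Overall Efficiency",),
--     ("Engagement",), ("Engagement", "Engagement Efficiency"),
--     ("Engagement", "View Efficiency"), ("Engagement", "Overall Efficiency"),
--     ("Reach",), ("Reach", "Engagement Efficiency"),
--     ("Reach", "View Efficiency"), ("Reach", "Overall Efficiency"),
--     ("Overall Reach",), ("Overall Reach", "Engagement Efficiency"),
--     ("Overall Reach", "View Efficiency"), ("Overall Performance",),
-- )
--
-- def condense_from_tiers(vt, et, vrt, ert, positive=True):
--     """Condense metrics to brief summary labels (precomputed lookup table)."""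
--     sel = ("Gold", "Silver") if positive else ("Bronze", "Needs Effort")
--     mask = (vt in sel) * 8 + (et in sel) * 4 + (vrt in sel) * 2 + (ert in sel)
--     return list(_TABLE[mask])
-- ===== Notes on version B (the rewrite author's own statement) =====
-- stated objective: alternative
-- what changed: Replaces all of A's branching (any/all guards, reach/efficiency case analysis) with a precomputed 16-entry lookup table indexed by the 4-bit membership mask of the four tiers in the selected tier set.
import Mathlib
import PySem

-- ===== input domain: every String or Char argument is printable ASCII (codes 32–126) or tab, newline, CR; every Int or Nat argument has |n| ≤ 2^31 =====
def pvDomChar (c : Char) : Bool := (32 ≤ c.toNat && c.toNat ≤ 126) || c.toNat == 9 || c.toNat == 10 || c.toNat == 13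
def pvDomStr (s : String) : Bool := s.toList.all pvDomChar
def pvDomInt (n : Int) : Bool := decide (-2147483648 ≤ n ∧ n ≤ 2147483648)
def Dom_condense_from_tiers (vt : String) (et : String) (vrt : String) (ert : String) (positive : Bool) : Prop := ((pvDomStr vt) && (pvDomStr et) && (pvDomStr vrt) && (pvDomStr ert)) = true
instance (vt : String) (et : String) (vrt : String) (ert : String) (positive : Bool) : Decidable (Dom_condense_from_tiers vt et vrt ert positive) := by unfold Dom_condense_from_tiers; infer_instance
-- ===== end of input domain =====

-- B replaces A's branching (any/all guards, reach/efficiency case analysis) with a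
-- precomputed 16-entry lookup table indexed by the 4-bit membership mask (objective: alternative).

-- ===== PORT A =====
-- the shared tail of A after the positive/negative branch (flags[:2] / flags[2:] and the appends)
def pvTailA (flags : List Bool) : List String :=
  let reach_flags := flags.take 2
  let eff_flags := flags.drop 2
  let result_parts : List String := []
  let result_parts :=
    if reach_flags.all (fun x => x) then result_parts ++ ["Overall Reach"]
    else
      let result_parts := if reach_flags.getD 0 false then result_parts ++ ["Reach"] else result_parts
      if reach_flags.getD 1 false then result_parts ++ ["Engagement"] else result_parts
  if eff_flags.all (fun x => x) then result_parts ++ ["Overall Efficiency"]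
  else
    let result_parts := if eff_flags.getD 0 false then result_parts ++ ["View Efficiency"] else result_parts
    if eff_flags.getD 1 false then result_parts ++ ["Engagement Efficiency"] else result_parts

def condense_from_tiers (vt : String) (et : String) (vrt : String) (ert : String) (positive : Bool) : List String :=
  let strong_tiers : List String := ["Gold", "Silver"]
  let weak_tiers : List String := ["Bronze", "Needs Effort"]
  let tiers := [vt, et, vrt, ert]
  if positive then
    if !(tiers.any (fun t => strong_tiers.contains t)) then []
    else
      let all_strong := tiers.all (fun t => strong_tiers.contains t)
      let flags := [strong_tiers.contains vt, strong_tiers.contains et, strong_tiers.contains vrt, strong_tiers.contains ert]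
      if all_strong then ["Overall Performance"]
      else pvTailA flags
  else
    if !(tiers.any (fun t => weak_tiers.contains t)) then []
    else
      let all_weak := tiers.all (fun t => weak_tiers.contains t)
      let flags := [weak_tiers.contains vt, weak_tiers.contains et, weak_tiers.contains vrt, weak_tiers.contains ert]
      if all_weak then ["Overall Performance"]
      else pvTailA flags

-- ===== PORT B =====
-- _TABLE from Source B, verbatim
def pvTableB : List (List String) :=
  [[], ["Engagement Efficiency"], ["View Efficiency"], ["Overall Efficiency"],
   ["Engagement"], ["Engagement", "Engagement Efficiency"],
   ["Engagement", "View Efficiency"], ["Engagement", "Overall Efficiency"],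
   ["Reach"], ["Reach", "Engagement Efficiency"],
   ["Reach", "View Efficiency"], ["Reach", "Overall Efficiency"],
   ["Overall Reach"], ["Overall Reach", "Engagement Efficiency"],
   ["Overall Reach", "View Efficiency"], ["Overall Performance"]]

def condense_from_tiers_alt (vt : String) (et : String) (vrt : String) (ert : String) (positive : Bool) : List String :=
  let sel : List String := if positive then ["Gold", "Silver"] else ["Bronze", "Needs Effort"]
  let mask := (if sel.contains vt then 8 else 0) + (if sel.contains et then 4 else 0)
            + (if sel.contains vrt then 2 else 0) + (if sel.contains ert then 1 else 0)
  -- _TABLE[mask]: mask is always in [0,15], so getD is exact here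
  pvTableB.getD mask []

-- ===== PRECONDITION & SPEC =====
def Spec_condense_from_tiers (vt : String) (et : String) (vrt : String) (ert : String) (positive : Bool) (out : List String) : Prop := out = condense_from_tiers_alt vt et vrt ert positive
instance (vt : String) (et : String) (vrt : String) (ert : String) (positive : Bool) (out : List String) : Decidable (Spec_condense_from_tiers vt et vrt ert positive out) := by unfold Spec_condense_from_tiers; infer_instance

-- ===== CLAIM =====
def Claim_equal_condense_from_tiers : Prop := ∀ (vt : String) (et : String) (vrt : String) (ert : String) (positive : Bool), Dom_condense_from_tiers vt et vrt ert positive → Spec_condense_from_tiers vt et vrt ert positive (condense_from_tiers vt et vrt ert positive)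

-- ===== LEMMAS AND PROOFS =====
-- Both programs depend only on the four membership booleans of the selected tier set:
-- generalize them and check all 16 cases.
theorem pv_core (sel : List String) (vt et vrt ert : String) :
    (let tiers := [vt, et, vrt, ert]
     if !(tiers.any (fun t => sel.contains t)) then ([] : List String)
     else
       let all_sel := tiers.all (fun t => sel.contains t)
       let flags := [sel.contains vt, sel.contains et, sel.contains vrt, sel.contains ert]
       if all_sel then ["Overall Performance"] else pvTailA flags)
    =
    (pvTableB.getD ((if sel.contains vt then 8 else 0) + (if sel.contains et then 4 else 0)
       + (if sel.contains vrt then 2 else 0) + (if sel.contains ert then 1 else 0)) []) := by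
  simp only [List.any, List.all, Bool.or_false, Bool.and_true]
  generalize sel.contains vt = b1
  generalize sel.contains et = b2
  generalize sel.contains vrt = b3
  generalize sel.contains ert = b4
  cases b1 <;> cases b2 <;> cases b3 <;> cases b4 <;> decide

-- ===== VERDICT =====
theorem condense_from_tiers_spec : Claim_equal_condense_from_tiers := by
  intro vt et vrt ert positive _
  unfold Spec_condense_from_tiers condense_from_tiers condense_from_tiers_alt
  cases positive
  · exact pv_core ["Bronze", "Needs Effort"] vt et vrt ert
  · exact pv_core ["Gold", "Silver"] vt et vrt ert
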